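-- pv_equiv track=rewrite | github.com/JBoissonnat/IH_project_2_Steam_data_pipeline | main_projet_2_pipes_steam.py | filter_first_genre
-- ===== SOURCE A (Python) =====
-- def filter_first_genre(s):
--
--     res = ""
--
--     not_genre = ["Free to Play","Nudity","Sexual Content","Violent","Early Access","Gore"]
--
--     genre_to_other = ["Valve","Animation & Modeling","Utilities","Design & Illustration",
--                   "Video Production","Audio Production","Web Publishing","Movie","Accounting",
--                   "Software Training","Photo Editing","Game Development","Short","HTC"]
--
--     lst = str(s).split(",")
--
--     to_remove = [e for e in lst if e in not_genre]
--
--     for e in to_remove: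
--         lst.remove(e)
--
--     if len(lst) > 0:
--         res = lst[0]
--
--         if res in genre_to_other:
--             res = "Other"
--
--     if res in ["", "nan"]:
--         res = "unknown"
--
--     return res
-- ===== SOURCE B (Python) =====
-- def filter_first_genre(s):
--     not_genre = ["Free to Play","Nudity","Sexual Content","Violent","Early Access","Gore"]
--
--     genre_to_other = ["Valve","Animation & Modeling","Utilities","Design & Illustration",
--                   "Video Production","Audio Production","Web Publishing","Movie","Accounting",
--                   "Software Training","Photo Editing","Game Development","Short","HTC"]
--
--     res = ""
--     for piece in str(s).split(","):
--         if piece not in not_genre: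
--             res = piece
--             break
--
--     if res in genre_to_other:
--         res = "Other"
--     if res in ["", "nan"]:
--         res = "unknown"
--     return res
-- ===== Notes on version B (the rewrite author's own statement) =====
-- stated objective: simpler
-- what changed: Replaces A's three passes (build the blacklist-occurrence list, repeatedly list.remove each one, then index [0]) with a single early-stopping scan that takes the first comma-piece not in the blacklist.
import Mathlib
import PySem

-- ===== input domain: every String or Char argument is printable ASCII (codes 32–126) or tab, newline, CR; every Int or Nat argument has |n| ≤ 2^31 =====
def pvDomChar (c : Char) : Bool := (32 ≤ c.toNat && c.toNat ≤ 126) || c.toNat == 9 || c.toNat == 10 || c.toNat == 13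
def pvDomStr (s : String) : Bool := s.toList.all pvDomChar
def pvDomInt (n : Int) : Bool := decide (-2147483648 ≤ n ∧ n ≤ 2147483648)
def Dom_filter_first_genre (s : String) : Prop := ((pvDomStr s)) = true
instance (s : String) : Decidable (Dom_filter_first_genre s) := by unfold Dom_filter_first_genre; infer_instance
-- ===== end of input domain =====

-- B replaces A's build-blacklist-then-remove-then-index passes by a single early-stopping
-- scan for the first non-blacklisted piece (objective: simpler).


-- ===== PORT A =====
def pvNotGenre : List String :=
  ["Free to Play","Nudity","Sexual Content","Violent","Early Access","Gore"]

def pvGenreToOther : List String :=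
  ["Valve","Animation & Modeling","Utilities","Design & Illustration",
   "Video Production","Audio Production","Web Publishing","Movie","Accounting",
   "Software Training","Photo Editing","Game Development","Short","HTC"]

def filter_first_genre (s : String) : String :=
  let res : String := ""
  let lst := (PySem.Str.split? s ",").getD []
  let to_remove := lst.filter (fun e => pvNotGenre.contains e)
  -- 'lst.remove(e)' always succeeds here (e ∈ lst), so the 'none' (ValueError) branch is unreachable
  let lst := to_remove.foldl (fun acc e => (PySem.List.remove? acc e).getD acc) lst
  let res :=
    if lst.length > 0 then
      let r := (PySem.List.pyGet? lst 0).getD res   -- in range: length > 0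
      if pvGenreToOther.contains r then "Other" else r
    else res
  if res = "" ∨ res = "nan" then "unknown" else res

-- ===== PORT B =====
def pvFirstKeep : List String → String
  | [] => ""
  | x :: xs => if pvNotGenre.contains x then pvFirstKeep xs else x

def filter_first_genre_alt (s : String) : String :=
  let res := pvFirstKeep ((PySem.Str.split? s ",").getD [])
  let res := if pvGenreToOther.contains res then "Other" else res
  if res = "" ∨ res = "nan" then "unknown" else res

-- ===== PRECONDITION & SPEC =====
def Spec_filter_first_genre (s : String) (out : String) : Prop := out = filter_first_genre_alt s
instance (s : String) (out : String) : Decidable (Spec_filter_first_genre s out) := by unfold Spec_filter_first_genre; infer_instance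

-- ===== CLAIM (what is proved, stated in full; the proofs are below) =====
def Claim_equal_filter_first_genre : Prop := ∀ (s : String), Dom_filter_first_genre s → Spec_filter_first_genre s (filter_first_genre s)

-- ===== LEMMAS AND PROOFS =====

-- removing a value that differs from the head commutes with consing the head
theorem pv_remove_step_cons (a e : String) (l : List String) (h : a ≠ e) :
    ((PySem.List.remove? (a :: l) e).getD (a :: l)) = a :: ((PySem.List.remove? l e).getD l) := by
  rw [PySem.List.remove?_cons_of_ne l h]
  cases PySem.List.remove? l e <;> simp

-- folding removals of values all satisfying the blacklist over a list whose head fails it keeps the head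
theorem pv_foldl_remove_cons (m : List String) (a : String) (l : List String)
    (hm : ∀ e ∈ m, pvNotGenre.contains e = true) (ha : pvNotGenre.contains a = false) :
    m.foldl (fun acc e => (PySem.List.remove? acc e).getD acc) (a :: l)
      = a :: m.foldl (fun acc e => (PySem.List.remove? acc e).getD acc) l := by
  induction m generalizing l with
  | nil => rfl
  | cons e m ih =>
    have hne : a ≠ e := by
      intro h; subst h
      rw [hm a (by simp)] at ha; simp at ha
    simp only [List.foldl_cons, pv_remove_step_cons a e l hne]
    exact ih ((PySem.List.remove? l e).getD l) (fun x hx => hm x (by simp [hx]))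

-- removing, one by one, every blacklisted occurrence leaves exactly the non-blacklisted ones
theorem pv_foldl_remove_filter (l : List String) :
    (l.filter (fun e => pvNotGenre.contains e)).foldl
        (fun acc e => (PySem.List.remove? acc e).getD acc) l
      = l.filter (fun e => !pvNotGenre.contains e) := by
  induction l with
  | nil => rfl
  | cons a l ih =>
    rcases ha : pvNotGenre.contains a with _ | _
    · rw [List.filter_cons, List.filter_cons, if_neg (by simpa using ha), if_pos (by simpa using ha)]
      rw [pv_foldl_remove_cons _ a l (fun e he => (List.mem_filter.mp he).2) ha, ih]
    · rw [List.filter_cons, List.filter_cons, if_pos (by simpa using ha), if_neg (by simpa using ha),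
        List.foldl_cons]
      simp only [PySem.List.remove?_cons_self, Option.getD_some]
      exact ih

-- B's early-stopping scan is the head of the filtered list (default "")
theorem pv_firstKeep_eq_headD (l : List String) :
    pvFirstKeep l = (l.filter (fun e => !pvNotGenre.contains e)).headD "" := by
  induction l with
  | nil => rfl
  | cons a l ih =>
    simp only [pvFirstKeep]
    rcases ha : pvNotGenre.contains a with _ | _
    · rw [if_neg (by simpa using ha), List.filter_cons, if_pos (by simpa using ha), List.headD_cons]
    · rw [if_pos (by simpa using ha), List.filter_cons, if_neg (by simpa using ha), ih]

-- ===== VERDICT (by name: the statement is the Claim_ definition above) =====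
theorem filter_first_genre_spec : Claim_equal_filter_first_genre := by
  intro s _
  unfold Spec_filter_first_genre
  show filter_first_genre s = filter_first_genre_alt s
  rw [filter_first_genre, filter_first_genre_alt]
  simp only [pv_foldl_remove_filter, pv_firstKeep_eq_headD]
  generalize (((PySem.Str.split? s ",").getD []).filter (fun e => !pvNotGenre.contains e)) = f
  cases f with
  | nil => decide
  | cons x xs => simp
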